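-- pv_equiv track=rewrite | github.com/Hannestly/coding-challenges | 79/79.py | checkdec
-- ===== SOURCE A (Python) =====
-- def checkdec(inputlist):
--     def subcheck(templist):
--         for i in range(len(templist)-1):
--             if templist[i] <= templist[i+1]:
--                 return True
--         return False
--
--     for i in range(len(inputlist)):
--         templist = inputlist[:i] + inputlist[i+1:]
--         if subcheck(templist) == True:
--             return True
--
--     return False
-- ===== SOURCE B (Python) =====
-- def checkdec(inputlist):
--     # Deleting one element from a list of length >= 3 leaves an ascent iff the
--     # list itself has an ascent; lists of length <= 2 can never yield one.
--     return len(inputlist) >= 3 and any(a <= b for a, b in zip(inputlist, inputlist[1:]))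
-- ===== Notes on version B (the rewrite author's own statement) =====
-- stated objective: simpler
-- what changed: Replaces A's try-every-deletion double loop (rebuild the list without element i, rescan it for an ascent) by the proved one-line closed form: result is exactly 'len >= 3 and the list has an adjacent non-descent', a single zip pass (O(n) worst case vs A's O(n^2) worst case, though A's early return makes typical inputs comparable).
import Mathlib
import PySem

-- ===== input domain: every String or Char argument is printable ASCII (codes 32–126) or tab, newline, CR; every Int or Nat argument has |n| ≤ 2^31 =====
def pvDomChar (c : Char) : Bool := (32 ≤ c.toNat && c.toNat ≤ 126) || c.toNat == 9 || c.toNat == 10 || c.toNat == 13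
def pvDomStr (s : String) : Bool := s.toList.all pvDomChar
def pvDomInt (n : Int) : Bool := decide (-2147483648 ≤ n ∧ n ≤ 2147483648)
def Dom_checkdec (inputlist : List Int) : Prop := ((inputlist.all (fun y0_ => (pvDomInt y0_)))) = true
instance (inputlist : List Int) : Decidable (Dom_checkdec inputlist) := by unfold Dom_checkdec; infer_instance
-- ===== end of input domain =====

-- B replaces A's try-every-deletion scan by the single-pass closed form
-- "length ≥ 3 and the list has an adjacent non-descent" (different algorithm).

-- ===== PORT A =====
-- inner helper subcheck: for i in range(len(t)-1): if t[i] <= t[i+1]: return True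
def subcheckA (t : List Int) : Bool :=
  (List.range (t.length - 1)).any fun i =>
    decide (PySem.List.pyGetD t (i : Int) 0 ≤ PySem.List.pyGetD t ((i : Int) + 1) 0)

-- for i in range(len(inputlist)): templist = inputlist[:i] + inputlist[i+1:]; if subcheck(templist): return True
def checkdec (inputlist : List Int) : Bool :=
  (List.range inputlist.length).any fun i =>
    subcheckA (PySem.List.slice inputlist none (some (i : Int)) ++
               PySem.List.slice inputlist (some ((i : Int) + 1)) none)

-- ===== PORT B =====
-- return len(inputlist) >= 3 and any(a <= b for a, b in zip(inputlist, inputlist[1:]))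
def checkdec_alt (inputlist : List Int) : Bool :=
  decide (3 ≤ inputlist.length) &&
    (inputlist.zip (inputlist.drop 1)).any fun p => decide (p.1 ≤ p.2)

-- ===== PRECONDITION & SPEC =====
def Spec_checkdec (inputlist : List Int) (out : Bool) : Prop := out = checkdec_alt inputlist
instance (inputlist : List Int) (out : Bool) : Decidable (Spec_checkdec inputlist out) := by unfold Spec_checkdec; infer_instance

-- ===== CLAIM (what is proved, stated in full; the proofs are below) =====
def Claim_equal_checkdec : Prop := ∀ (inputlist : List Int), Dom_checkdec inputlist → Spec_checkdec inputlist (checkdec inputlist)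

-- ===== LEMMAS AND PROOFS =====

-- "the list has an adjacent non-descent", the characterisation both ports are reduced to
def HasAsc (l : List Int) : Prop := ∃ i : Nat, ∃ h : i + 1 < l.length, l[i] ≤ l[i + 1]

theorem hasAsc_cons (a b : Int) (t : List Int) :
    HasAsc (a :: b :: t) ↔ a ≤ b ∨ HasAsc (b :: t) := by
  constructor
  · rintro ⟨i, h, hle⟩
    cases i with
    | zero => exact Or.inl (by simpa using hle)
    | succ j => exact Or.inr ⟨j, by simpa using h, by simpa using hle⟩
  · rintro (hab | ⟨j, h, hle⟩)
    · exact ⟨0, by simp, by simpa using hab⟩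
    · exact ⟨j + 1, by simpa using h, by simpa using hle⟩

theorem zip_any_iff (l : List Int) :
    ((l.zip (l.drop 1)).any fun p => decide (p.1 ≤ p.2)) = true ↔ HasAsc l := by
  induction l with
  | nil => simp [HasAsc]
  | cons a t ih =>
    cases t with
    | nil => simp [HasAsc]
    | cons b t' =>
      simp only [List.drop_one, List.tail_cons] at ih ⊢
      simp only [List.zip_cons_cons, List.any_cons, Bool.or_eq_true, decide_eq_true_iff]
      rw [hasAsc_cons]
      constructor
      · rintro (h | h); exact Or.inl h; exact Or.inr (ih.mp (by simpa using h))
      · rintro (h | h); exact Or.inl h; exact Or.inr (by simpa using ih.mpr h)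

theorem subcheckA_iff (t : List Int) : subcheckA t = true ↔ HasAsc t := by
  simp only [subcheckA, List.any_eq_true, List.mem_range, decide_eq_true_iff]
  constructor
  · rintro ⟨i, hi, hle⟩
    refine ⟨i, by omega, ?_⟩
    rwa [show ((i:Int)+1) = ((i+1:Nat):Int) by push_cast; ring, PySem.List.pyGetD_natCast,
      PySem.List.pyGetD_natCast, List.getD_eq_getElem _ _ (by omega),
      List.getD_eq_getElem _ _ (by omega)] at hle
  · rintro ⟨i, hi, hle⟩
    refine ⟨i, by omega, ?_⟩
    rwa [show ((i:Int)+1) = ((i+1:Nat):Int) by push_cast; ring, PySem.List.pyGetD_natCast,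
      PySem.List.pyGetD_natCast, List.getD_eq_getElem _ _ (by omega),
      List.getD_eq_getElem _ _ (by omega)]

-- the Python slices l[:i] + l[i+1:] as take/drop
theorem slice_remove (l : List Int) (i : Nat) :
    PySem.List.slice l none (some (i : Int)) ++ PySem.List.slice l (some ((i : Int) + 1)) none
      = l.take i ++ l.drop (i + 1) := by
  rw [PySem.List.slice_to_natCast, show ((i : Int) + 1) = ((i + 1 : Nat) : Int) by push_cast; ring,
    PySem.List.slice_from_natCast]

theorem remove_getElem (l : List Int) (i j : Nat) (hi : i < l.length)
    (hj : j < (l.take i ++ l.drop (i + 1)).length) :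
    (l.take i ++ l.drop (i + 1))[j] =
      if hji : j < i then l[j]'(by simp at hj; omega) else l[j + 1]'(by simp at hj; omega) := by
  split_ifs with hji
  · rw [List.getElem_append_left (by simp; omega)]
    simp
  · rw [List.getElem_append_right (by simp; omega)]
    rw [List.getElem_drop]
    congr 1
    simp at hj ⊢
    omega

-- the combinatorial heart: some one-element deletion leaves a non-descent
-- iff the list has length ≥ 3 and itself has a non-descent
theorem hasAsc_remove_iff (l : List Int) :
    (∃ i, i < l.length ∧ HasAsc (l.take i ++ l.drop (i + 1))) ↔ (3 ≤ l.length ∧ HasAsc l) := by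
  constructor
  · rintro ⟨i, hi, j, hj, hle⟩
    have hlen : (l.take i ++ l.drop (i + 1)).length = l.length - 1 := by simp; omega
    have h3 : 3 ≤ l.length := by omega
    refine ⟨h3, ?_⟩
    rw [remove_getElem l i j hi (by omega), remove_getElem l i (j+1) hi (by omega)] at hle
    split_ifs at hle with h1 h2 h2
    · exact ⟨j, by omega, hle⟩
    · by_cases hmid : l[j]'(by omega) ≤ l[j+1]'(by omega)
      · exact ⟨j, by omega, hmid⟩
      · exact ⟨j+1, by omega, le_trans (not_le.mp hmid).le hle⟩
    · omega
    · exact ⟨j+1, by omega, hle⟩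
  · rintro ⟨h3, j, hj, hle⟩
    by_cases hend : j + 1 < l.length - 1
    · refine ⟨l.length - 1, by omega, j, ?_, ?_⟩
      · simp; omega
      · rw [remove_getElem l (l.length - 1) j (by omega) (by simp; omega),
          remove_getElem l (l.length - 1) (j+1) (by omega) (by simp; omega),
          dif_pos (by omega), dif_pos (by omega)]
        exact hle
    · have hj1 : 1 ≤ j := by omega
      refine ⟨0, by omega, j - 1, ?_, ?_⟩
      · simp; omega
      · rw [remove_getElem l 0 (j-1) (by omega) (by simp; omega),
          remove_getElem l 0 (j-1+1) (by omega) (by simp; omega),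
          dif_neg (by omega), dif_neg (by omega)]
        have e1 : j - 1 + 1 = j := by omega
        simp only [e1]
        exact hle

theorem main_iff (l : List Int) : checkdec l = true ↔ (3 ≤ l.length ∧ HasAsc l) := by
  rw [← hasAsc_remove_iff]
  simp only [checkdec, List.any_eq_true, List.mem_range, slice_remove, subcheckA_iff]

theorem alt_iff (l : List Int) : checkdec_alt l = true ↔ (3 ≤ l.length ∧ HasAsc l) := by
  rw [checkdec_alt, Bool.and_eq_true, decide_eq_true_iff, zip_any_iff]

-- ===== VERDICT (by name: the statement is the Claim_ definition above) =====
theorem checkdec_spec : Claim_equal_checkdec := by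
  intro l _
  unfold Spec_checkdec
  rw [Bool.eq_iff_iff, main_iff, alt_iff]
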